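-- pv_equiv track=rewrite | github.com/connor-makowski/srt_file_translator | srt_translator/__init__.py | aggregate_statements
-- ===== SOURCE A (Python) =====
-- def aggregate_statements(srt_data: dict, statement_delimiters: list):
--     data = []
--     for key, value in srt_data.items():
--         raw_string = " ".join(value[:-1] + [""])
--         data.append(
--             {
--                 "start": key.split(" --> ")[0],
--                 "end": key.split(" --> ")[1],
--                 "string": raw_string.strip(),
--             }
--         )
--     merged_data = []
--     for idx, item in enumerate(data):
--         if len(item["string"]) == 0:
--             continue
--         if (
--             item["string"][-1] in statement_delimiters
--             or idx == len(data) - 1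
--         ):
--             merged_data.append(item)
--         else:
--             data[idx + 1]["string"] = (
--                 item["string"] + " " + data[idx + 1]["string"]
--             )
--             data[idx + 1]["start"] = item["start"]
--     out_data = {}
--     for item in merged_data:
--         out_data[item["start"] + " --> " + item["end"]] = item[
--             "string"
--         ].strip()
--     return out_data
-- ===== SOURCE B (Python) =====
-- def aggregate_statements(srt_data: dict, statement_delimiters: list):
--     rows = [
--         (
--             key.split(" --> ")[0],
--             key.split(" --> ")[1],
--             " ".join(value[:-1] + [""]).strip(),
--         )
--         for key, value in srt_data.items()
--     ]
--     out_data = {}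
--     acc = ""
--     acc_start = ""
--     for start, end, frag in rows:
--         if acc == "" and frag == "":
--             continue
--         if acc == "":
--             acc_start = start
--             acc = frag
--         else:
--             acc = acc + " " + frag
--         acc_end = end
--         if acc[-1] in statement_delimiters:
--             out_data[acc_start + " --> " + acc_end] = acc.strip()
--             acc = ""
--     if acc != "":
--         out_data[acc_start + " --> " + acc_end] = acc.strip()
--     return out_data
-- ===== Notes on version B (the rewrite author's own statement) =====
-- stated objective: simpler
-- what changed: Replaced A's three passes (build rows, forward-carry merge that mutates the next row, then copy merged rows into a dict) by one accumulator pass over the rows that builds the output dict directly.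
import Mathlib
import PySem

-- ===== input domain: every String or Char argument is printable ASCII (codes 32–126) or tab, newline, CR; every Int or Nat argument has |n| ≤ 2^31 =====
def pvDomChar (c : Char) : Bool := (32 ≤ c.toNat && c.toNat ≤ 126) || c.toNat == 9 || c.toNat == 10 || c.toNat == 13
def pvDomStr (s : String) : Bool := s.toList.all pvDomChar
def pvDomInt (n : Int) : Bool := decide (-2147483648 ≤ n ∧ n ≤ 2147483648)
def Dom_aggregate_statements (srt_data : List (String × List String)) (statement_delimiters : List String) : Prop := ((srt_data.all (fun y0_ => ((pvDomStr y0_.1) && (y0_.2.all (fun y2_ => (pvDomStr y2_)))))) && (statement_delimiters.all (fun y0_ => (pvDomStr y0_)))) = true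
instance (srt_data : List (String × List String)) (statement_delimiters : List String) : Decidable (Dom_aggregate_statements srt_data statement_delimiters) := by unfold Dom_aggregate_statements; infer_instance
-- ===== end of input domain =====

-- B replaces A's three passes (rows, forward-carry merge mutating the next row, dict copy) by one
-- accumulator pass over the rows building the dict directly; same return value everywhere A returns.

-- ===== PORT A =====

-- `item["string"][-1] in statement_delimiters` (s[-1] is a 1-char str; only 1-char delimiters can match)
def pvDelimHit (delims : List String) (s : String) : Bool :=
  match PySem.Str.pyGet? s (-1) with
  | some c => decide (String.singleton c ∈ delims)
  | none => false

-- A's second loop: `continue` on empty strings, flush on delimiter-or-last, else prepend into the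
-- next row (its string becomes cur ++ " " ++ next, its start becomes cur's start); returns merged_data.
def pvMergeA (delims : List String) (l : List (String × String × String)) :
    List (String × String × String) :=
  match l with
  | [] => []
  | it :: rest =>
    if PySem.Str.len it.2.2 == 0 then pvMergeA delims rest
    else if pvDelimHit delims it.2.2 || rest.isEmpty then it :: pvMergeA delims rest
    else
      match rest with
      | [] => []  -- unreachable: rest.isEmpty handled above
      | nx :: rr => pvMergeA delims ((it.1, nx.2.1, it.2.2 ++ " " ++ nx.2.2) :: rr)
termination_by l.length

-- port of A: pass 1 builds data = [(start, end, string)], pass 2 merges, pass 3 fills out_data.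
-- key.split(" --> ")[1] raises IndexError when the key has no " --> "; Pre_ excludes that, the
-- port's `.getD ""` default there is never exercised inside Pre_.
def aggregate_statements (srt_data : List (String × List String)) (statement_delimiters : List String) : List (String × String) :=
  let data := (PySem.Dict.ofList srt_data).items.map (fun kv =>
    let parts := (PySem.Str.split? kv.1 " --> ").getD []
    (parts.getD 0 "", PySem.List.pyGetD parts 1 "",
      PySem.Str.strip (PySem.Str.join " " (PySem.List.slice kv.2 none (some (-1)) ++ [""]))))
  let merged := pvMergeA statement_delimiters data
  (merged.foldl (fun d it => d.insert (it.1 ++ " --> " ++ it.2.1) (PySem.Str.strip it.2.2))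
    (PySem.Dict.empty : PySem.Dict String String)).items

-- ===== PORT B =====

-- B's single loop: state = (acc, acc_start, acc_end, out_data); leading empty fragments are skipped,
-- otherwise the fragment is absorbed into acc, and acc is flushed when its last char is a delimiter;
-- trailing acc is flushed after the loop.
def pvLoopB (delims : List String) (l : List (String × String × String))
    (acc accStart accEnd : String) (out : PySem.Dict String String) : PySem.Dict String String :=
  match l with
  | [] => if acc == "" then out else out.insert (accStart ++ " --> " ++ accEnd) (PySem.Str.strip acc)
  | (st, en, s) :: rs =>
    if acc == "" && s == "" then pvLoopB delims rs acc accStart accEnd out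
    else
      let accStart' := if acc == "" then st else accStart
      let acc' := if acc == "" then s else acc ++ " " ++ s
      if pvDelimHit delims acc' then
        pvLoopB delims rs "" accStart' en (out.insert (accStart' ++ " --> " ++ en) (PySem.Str.strip acc'))
      else pvLoopB delims rs acc' accStart' en out

def aggregate_statements_alt (srt_data : List (String × List String)) (statement_delimiters : List String) : List (String × String) :=
  let rows := (PySem.Dict.ofList srt_data).items.map (fun kv =>
    let parts := (PySem.Str.split? kv.1 " --> ").getD []
    (parts.getD 0 "", PySem.List.pyGetD parts 1 "",
      PySem.Str.strip (PySem.Str.join " " (PySem.List.slice kv.2 none (some (-1)) ++ [""]))))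
  (pvLoopB statement_delimiters rows "" "" "" PySem.Dict.empty).items

-- ===== PRECONDITION & SPEC =====
-- Pre_ excludes exactly the inputs where both Pythons raise IndexError:
-- a key without the substring " --> " makes key.split(" --> ")[1] fail.
def Pre_aggregate_statements (srt_data : List (String × List String)) (statement_delimiters : List String) : Prop :=
  ∀ p ∈ srt_data, PySem.Str.isIn " --> " p.1 = true
instance (srt_data : List (String × List String)) (statement_delimiters : List String) : Decidable (Pre_aggregate_statements srt_data statement_delimiters) := by unfold Pre_aggregate_statements; infer_instance
def pvWitness_aggregate_statements : (List (String × List String)) × List String :=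
  ([("0 --> 1", ["hi", "x"]), ("1 --> 2", ["there.", "x"])], ["."])

def Spec_aggregate_statements (srt_data : List (String × List String)) (statement_delimiters : List String) (out : List (String × String)) : Prop := out = aggregate_statements_alt srt_data statement_delimiters
instance (srt_data : List (String × List String)) (statement_delimiters : List String) (out : List (String × String)) : Decidable (Spec_aggregate_statements srt_data statement_delimiters out) := by unfold Spec_aggregate_statements; infer_instance

-- ===== CLAIM (what is proved, stated in full; the proofs are below) =====
def Claim_equal_aggregate_statements : Prop := ∀ (srt_data : List (String × List String)) (statement_delimiters : List String), Dom_aggregate_statements srt_data statement_delimiters → Pre_aggregate_statements srt_data statement_delimiters → Spec_aggregate_statements srt_data statement_delimiters (aggregate_statements srt_data statement_delimiters)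

-- ===== LEMMAS AND PROOFS =====

theorem pv_append_ne_empty (a b : String) : a ++ " " ++ b ≠ "" := by
  intro h
  have : (a ++ " " ++ b).length = "".length := by rw [h]
  simp [String.length_append] at this

-- the four reduction shapes of A's merge loop
theorem pv_merge_nil (delims : List String) : pvMergeA delims [] = [] := by
  rw [pvMergeA.eq_def]

theorem pv_merge_skip (delims : List String) (st en : String)
    (rs : List (String × String × String)) :
    pvMergeA delims ((st, en, "") :: rs) = pvMergeA delims rs := by
  rw [pvMergeA.eq_def]; simp [PySem.Str.len_eq]

theorem pv_merge_flush (delims : List String) (st en s : String)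
    (rs : List (String × String × String)) (hs : s ≠ "") (hd : pvDelimHit delims s = true) :
    pvMergeA delims ((st, en, s) :: rs) = (st, en, s) :: pvMergeA delims rs := by
  rw [pvMergeA.eq_def]; simp [PySem.Str.len_eq, hs, hd]

theorem pv_merge_last (delims : List String) (st en s : String) (hs : s ≠ "") :
    pvMergeA delims [(st, en, s)] = [(st, en, s)] := by
  rw [pvMergeA.eq_def]; simp [PySem.Str.len_eq, hs, pv_merge_nil]

theorem pv_merge_carry (delims : List String) (st en s : String)
    (n : String × String × String) (nr : List (String × String × String))
    (hs : s ≠ "") (hd : pvDelimHit delims s = false) :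
    pvMergeA delims ((st, en, s) :: n :: nr)
      = pvMergeA delims ((st, n.2.1, s ++ " " ++ n.2.2) :: nr) := by
  rw [pvMergeA.eq_def]; simp [PySem.Str.len_eq, hs, hd]

-- A's merged_data folded into the dict equals B's single loop, in both loop states:
-- empty accumulator, and a non-empty accumulator whose last char is not a delimiter
-- (B already checked it when it formed acc), which stands for a pending row (as, ae, acc) of A.
theorem pvLoop_eq_merge (delims : List String) (rows : List (String × String × String)) :
    (∀ (as ae : String) (d : PySem.Dict String String),
      pvLoopB delims rows "" as ae d =
        (pvMergeA delims rows).foldl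
          (fun d it => d.insert (it.1 ++ " --> " ++ it.2.1) (PySem.Str.strip it.2.2)) d) ∧
    (∀ (acc as ae : String) (d : PySem.Dict String String), acc ≠ "" →
      pvDelimHit delims acc = false →
      pvLoopB delims rows acc as ae d =
        (pvMergeA delims ((as, ae, acc) :: rows)).foldl
          (fun d it => d.insert (it.1 ++ " --> " ++ it.2.1) (PySem.Str.strip it.2.2)) d) := by
  induction rows with
  | nil =>
    constructor
    · intro as ae d; simp [pvLoopB, pv_merge_nil]
    · intro acc as ae d hacc hdel
      have hne : (acc == "") = false := by simp [hacc]
      rw [pv_merge_last delims as ae acc hacc]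
      simp [pvLoopB, hne]
  | cons r rs ih =>
    obtain ⟨st, en, s⟩ := r
    obtain ⟨ih1, ih2⟩ := ih
    constructor
    · intro as ae d
      by_cases hs : s = ""
      · -- leading empty fragment: both skip it
        subst hs
        rw [pv_merge_skip]
        simp only [pvLoopB, beq_self_eq_true, Bool.and_self, if_true]
        exact ih1 as ae d
      · have hsne : (s == "") = false := by simp [hs]
        simp only [pvLoopB, hsne, Bool.and_false, Bool.false_eq_true, if_false,
          beq_self_eq_true, if_true]
        by_cases hd : pvDelimHit delims s = true
        · -- fragment already ends in a delimiter: both flush it at once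
          rw [pv_merge_flush delims st en s rs hs hd, List.foldl_cons]
          simp only [hd, if_true]
          exact ih1 st en _
        · -- fragment kept pending: B's state (s, st, en) is A's current row (st, en, s)
          have hdf : pvDelimHit delims s = false := by simpa using hd
          simp only [hdf, Bool.false_eq_true, if_false]
          cases rs with
          | nil =>
            rw [pv_merge_last delims st en s hs]
            simp [pvLoopB, hsne]
          | cons n nr => exact ih2 s st en d hs hdf
    · intro acc as ae d hacc hdel
      have hne : (acc == "") = false := by simp [hacc]
      have hane : acc ++ " " ++ s ≠ "" := pv_append_ne_empty acc s
      -- A carries acc into the next row (st, en, s); B absorbs the row into acc: same pending row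
      rw [pv_merge_carry delims as ae acc (st, en, s) rs hacc hdel]
      simp only [pvLoopB, hne, Bool.false_and, Bool.false_eq_true, if_false]
      by_cases hd' : pvDelimHit delims (acc ++ " " ++ s) = true
      · simp only [hd', if_true]
        rw [pv_merge_flush delims as en (acc ++ " " ++ s) rs hane hd', List.foldl_cons]
        exact ih1 as en _
      · have hd'f : pvDelimHit delims (acc ++ " " ++ s) = false := by simpa using hd'
        simp only [hd'f, Bool.false_eq_true, if_false]
        exact ih2 (acc ++ " " ++ s) as en d hane hd'f

-- ===== VERDICT (by name: the statement is the Claim_ definition above) =====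
theorem aggregate_statements_spec : Claim_equal_aggregate_statements := by
  intro srt_data delims _hDom _hPre
  unfold Spec_aggregate_statements aggregate_statements aggregate_statements_alt
  exact congrArg PySem.Dict.items ((pvLoop_eq_merge delims _).1 "" "" _).symm
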